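-- pv_equiv track=rewrite | github.com/prikibak/YPracticum_algorithms | sprint5/I copy.py | get_tree_variants
-- ===== SOURCE A (Python) =====
-- def get_tree_variants(binary_tree: list, available_nodes_number: int):
--     if available_nodes_number == 0:
--         return [tuple(binary_tree)]
--
--     res = []
--     for i, node in enumerate(binary_tree):
--         if node == 1:
--             if binary_tree[2*i+1] == 0:
--                 new_b_tree = list(binary_tree)
--                 new_b_tree[2*i+1] = 1
--                 res += get_tree_variants(new_b_tree, available_nodes_number-1)
--             if binary_tree[2*i+2] == 0:
--                 new_b_tree = list(binary_tree)
--                 new_b_tree[2*i+2] = 1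
--                 res += get_tree_variants(new_b_tree, available_nodes_number-1)
--     return res
-- ===== SOURCE B (Python) =====
-- def get_tree_variants(binary_tree: list, available_nodes_number: int):
--     frontier = [list(binary_tree)]
--     for _ in range(available_nodes_number):
--         if not frontier:
--             break
--         next_frontier = []
--         for t in frontier:
--             for i, node in enumerate(t):
--                 if node == 1:
--                     if t[2*i+1] == 0:
--                         child = list(t)
--                         child[2*i+1] = 1
--                         next_frontier.append(child)
--                     if t[2*i+2] == 0:
--                         child = list(t)
--                         child[2*i+2] = 1
--                         next_frontier.append(child)
--         frontier = next_frontier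
--     return [tuple(t) for t in frontier]
-- ===== Notes on version B (the rewrite author's own statement) =====
-- stated objective: alternative
-- what changed: Replaces A's depth-first recursion (each candidate child recursing to full depth before the next) by an iterative breadth-first expansion: a frontier of trees is expanded level by level for available_nodes_number rounds, which yields the same list because level-wise expansion distributes over concatenation. Pre_ excludes inputs where A raises IndexError (a reachable 1-node whose child index falls outside the list) and negative counts, which lie outside the task's natural domain (A's [] there is an artifact of recursing past zero; B's loop naturally runs zero rounds).
-- outside the precondition, e.g. on get_tree_variants([1, 7, 7], -1): A returns [], B returns [(1, 7, 7)]
import Mathlib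
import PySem

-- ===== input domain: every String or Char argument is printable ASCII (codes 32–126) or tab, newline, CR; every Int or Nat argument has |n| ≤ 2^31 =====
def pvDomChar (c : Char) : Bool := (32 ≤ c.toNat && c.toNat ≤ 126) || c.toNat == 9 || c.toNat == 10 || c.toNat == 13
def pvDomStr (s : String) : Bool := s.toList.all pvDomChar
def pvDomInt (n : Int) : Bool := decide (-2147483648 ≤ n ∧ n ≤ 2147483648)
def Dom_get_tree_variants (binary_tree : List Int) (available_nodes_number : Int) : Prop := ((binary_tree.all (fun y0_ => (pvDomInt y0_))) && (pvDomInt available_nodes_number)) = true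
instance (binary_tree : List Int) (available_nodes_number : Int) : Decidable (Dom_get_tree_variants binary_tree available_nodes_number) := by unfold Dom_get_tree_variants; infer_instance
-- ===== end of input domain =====

-- B replaces A's depth-first recursion by an iterative breadth-first frontier expansion (alternative
-- decomposition, same cost); equivalence is about the return value only (neither mutates its input).

-- ===== PORT A =====
-- Python's recursion counts available_nodes_number down to 0; Pre_ restricts to 0 ≤ n, so the
-- countdown is ported as a Nat fuel (n.toNat).  Out-of-range child reads (Python: IndexError,
-- excluded by Pre_) are ported as a default read of 9 (≠ 0, so the branch is skipped).
def gtvA : Nat → List Int → List (List Int)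
  | 0, bt => [bt]
  | fuel+1, bt =>
      (PySem.List.enumerate bt).foldl
        (fun res p =>
          if p.2 = 1 then
            let res1 := if PySem.List.pyGetD bt (2*p.1+1) 9 = 0 then
                res ++ gtvA fuel (bt.set (2*p.1+1).toNat 1) else res
            if PySem.List.pyGetD bt (2*p.1+2) 9 = 0 then
                res1 ++ gtvA fuel (bt.set (2*p.1+2).toNat 1) else res1
          else res) []

def get_tree_variants (binary_tree : List Int) (available_nodes_number : Int) : List (List Int) :=
  gtvA available_nodes_number.toNat binary_tree

-- ===== PORT B =====
-- inner double loop of Source B: extend `nxt` with every one-node extension of `t` (same read/write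
-- conventions as port A)
def pvExpandInto (nxt : List (List Int)) (t : List Int) : List (List Int) :=
  (PySem.List.enumerate t).foldl
    (fun nxt p =>
      if p.2 = 1 then
        let nxt1 := if PySem.List.pyGetD t (2*p.1+1) 9 = 0 then
            nxt ++ [t.set (2*p.1+1).toNat 1] else nxt
        if PySem.List.pyGetD t (2*p.1+2) 9 = 0 then
            nxt1 ++ [t.set (2*p.1+2).toNat 1] else nxt1
      else nxt) nxt

-- Source B's counted round loop 'for _ in range(n): if not frontier: break; …' as a countdown on the
-- (nonnegative, by Pre_) round count
def pvRounds : Nat → List (List Int) → List (List Int)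
  | 0, frontier => frontier
  | k+1, frontier =>
      if frontier = [] then frontier
      else pvRounds k (frontier.foldl pvExpandInto [])

def get_tree_variants_alt (binary_tree : List Int) (available_nodes_number : Int) : List (List Int) :=
  pvRounds available_nodes_number.toNat [binary_tree]

-- ===== PRECONDITION & SPEC =====
-- positions that can hold a 1 after at most k node additions: the original 1s, closed k times
-- under taking an in-range child slot whose current value is 0
def pvReach (bt : List Int) : Nat → List Nat
  | 0 => (List.range bt.length).filter (fun i => bt.getD i 0 == 1)
  | k+1 =>
      PySem.List.dedup
        (pvReach bt k ++ (pvReach bt k).flatMap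
          (fun p => [2*p+1, 2*p+2].filter (fun c => decide (c < bt.length) && (bt.getD c 0 == 0))))

-- Pre_ excludes (a) inputs where A raises IndexError: some position reachable within n-1 additions
-- holds a 1 whose child index 2*i+2 falls outside the list; and (b) negative counts, outside the
-- task's natural domain (A's [] there is an artifact of recursing past zero).
def Pre_get_tree_variants (binary_tree : List Int) (available_nodes_number : Int) : Prop :=
  0 ≤ available_nodes_number ∧
    (available_nodes_number = 0 ∨
      (pvReach binary_tree (min (available_nodes_number - 1).toNat binary_tree.length)).all
        (fun i => decide (2*i+2 < binary_tree.length)) = true)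
instance (binary_tree : List Int) (available_nodes_number : Int) : Decidable (Pre_get_tree_variants binary_tree available_nodes_number) := by unfold Pre_get_tree_variants; infer_instance

def pvWitness_get_tree_variants : List Int × Int := ([1, 0, 0], 1)

def Spec_get_tree_variants (binary_tree : List Int) (available_nodes_number : Int) (out : List (List Int)) : Prop := out = get_tree_variants_alt binary_tree available_nodes_number
instance (binary_tree : List Int) (available_nodes_number : Int) (out : List (List Int)) : Decidable (Spec_get_tree_variants binary_tree available_nodes_number out) := by unfold Spec_get_tree_variants; infer_instance

-- ===== CLAIM (what is proved, stated in full; the proofs are below) =====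
def Claim_equal_get_tree_variants : Prop := ∀ (binary_tree : List Int) (available_nodes_number : Int), Dom_get_tree_variants binary_tree available_nodes_number → Pre_get_tree_variants binary_tree available_nodes_number → Spec_get_tree_variants binary_tree available_nodes_number (get_tree_variants binary_tree available_nodes_number)

-- ===== LEMMAS AND PROOFS =====

-- the (0, 1 or 2) one-node extensions contributed by one enumerated position
def pvKids (bt : List Int) (p : Int × Int) : List (List Int) :=
  if p.2 = 1 then
    (if PySem.List.pyGetD bt (2*p.1+1) 9 = 0 then [bt.set (2*p.1+1).toNat 1] else []) ++
    (if PySem.List.pyGetD bt (2*p.1+2) 9 = 0 then [bt.set (2*p.1+2).toNat 1] else [])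
  else []

def pvExpand (bt : List Int) : List (List Int) :=
  (PySem.List.enumerate bt).flatMap (pvKids bt)

lemma pvExpandInto_eq (nxt : List (List Int)) (t : List Int) :
    pvExpandInto nxt t = nxt ++ pvExpand t := by
  unfold pvExpandInto pvExpand
  have h : (fun (nxt : List (List Int)) (p : Int × Int) =>
      if p.2 = 1 then
        let nxt1 := if PySem.List.pyGetD t (2*p.1+1) 9 = 0 then
            nxt ++ [t.set (2*p.1+1).toNat 1] else nxt
        if PySem.List.pyGetD t (2*p.1+2) 9 = 0 then
            nxt1 ++ [t.set (2*p.1+2).toNat 1] else nxt1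
      else nxt) = fun nxt p => nxt ++ pvKids t p := by
    funext nxt p
    simp only [pvKids]
    split_ifs <;> simp
  rw [h, PySem.List.foldl_append_eq_flatMap]

lemma gtvA_succ (fuel : Nat) (bt : List Int) :
    gtvA (fuel+1) bt = (pvExpand bt).flatMap (gtvA fuel) := by
  show (PySem.List.enumerate bt).foldl _ [] = _
  have h : (fun (res : List (List Int)) (p : Int × Int) =>
      if p.2 = 1 then
        let res1 := if PySem.List.pyGetD bt (2*p.1+1) 9 = 0 then
            res ++ gtvA fuel (bt.set (2*p.1+1).toNat 1) else res
        if PySem.List.pyGetD bt (2*p.1+2) 9 = 0 then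
            res1 ++ gtvA fuel (bt.set (2*p.1+2).toNat 1) else res1
      else res) = fun res p => res ++ (pvKids bt p).flatMap (gtvA fuel) := by
    funext res p
    simp only [pvKids]
    split_ifs <;> simp
  rw [h, PySem.List.foldl_append_eq_flatMap]
  simp [pvExpand, List.flatMap_assoc]

-- one breadth-first round of Source B
def pvF (S : List (List Int)) : List (List Int) := S.foldl pvExpandInto []

lemma pvF_eq (S : List (List Int)) : pvF S = S.flatMap pvExpand := by
  unfold pvF
  rw [show pvExpandInto = fun acc t => acc ++ pvExpand t from funext₂ pvExpandInto_eq,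
    PySem.List.foldl_append_eq_flatMap, List.nil_append]

-- the frontier after k rounds
def pvIter (k : Nat) (S : List (List Int)) : List (List Int) :=
  (List.range k).foldl (fun frontier _ => frontier.foldl pvExpandInto []) S

lemma pvIter_succ_right (k : Nat) (S : List (List Int)) :
    pvIter (k+1) S = pvF (pvIter k S) := by
  simp [pvIter, List.range_succ, pvF]

lemma pvIter_append (k : Nat) (S₁ S₂ : List (List Int)) :
    pvIter k (S₁ ++ S₂) = pvIter k S₁ ++ pvIter k S₂ := by
  induction k with
  | zero => rfl
  | succ k ih => rw [pvIter_succ_right, pvIter_succ_right, pvIter_succ_right, ih,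
      pvF_eq, pvF_eq, pvF_eq, List.flatMap_append]

lemma pvIter_nil (k : Nat) : pvIter k [] = [] := by
  induction k with
  | zero => rfl
  | succ k ih => rw [pvIter_succ_right, ih]; rfl

lemma pvIter_flatMap (k : Nat) (S : List (List Int)) :
    pvIter k S = S.flatMap (fun t => pvIter k [t]) := by
  induction S with
  | nil => simp [pvIter_nil]
  | cons t S ih =>
      have : t :: S = [t] ++ S := rfl
      rw [this, pvIter_append, ih]; simp

lemma pvIter_succ_left (k : Nat) (S : List (List Int)) :
    pvIter (k+1) S = pvIter k (pvF S) := by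
  induction k generalizing S with
  | zero => rw [pvIter_succ_right]; rfl
  | succ k ih => rw [pvIter_succ_right, ih, pvIter_succ_right]

lemma gtvA_eq_pvIter (k : Nat) (bt : List Int) : gtvA k bt = pvIter k [bt] := by
  induction k generalizing bt with
  | zero => rfl
  | succ k ih =>
      rw [gtvA_succ, pvIter_succ_left]
      have hF : pvF [bt] = pvExpand bt := by simp [pvF_eq]
      rw [hF, pvIter_flatMap k (pvExpand bt)]
      exact List.flatMap_congr (fun t _ => ih t)

lemma pvRounds_eq_pvIter (k : Nat) (S : List (List Int)) :
    pvRounds k S = pvIter k S := by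
  induction k generalizing S with
  | zero => rfl
  | succ k ih =>
      show (if S = [] then S else pvRounds k (S.foldl pvExpandInto [])) = _
      split
      · subst S; rw [pvIter_nil]
      · rw [pvIter_succ_left]; exact ih (pvF S)

lemma alt_eq_pvIter (bt : List Int) (n : Int) :
    get_tree_variants_alt bt n = pvIter n.toNat [bt] := pvRounds_eq_pvIter n.toNat [bt]

-- ===== VERDICT (by name: the statement is the Claim_ definition above) =====
theorem get_tree_variants_spec : Claim_equal_get_tree_variants := by
  intro bt n _ _
  show get_tree_variants bt n = get_tree_variants_alt bt n
  rw [alt_eq_pvIter]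
  exact gtvA_eq_pvIter n.toNat bt
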